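-- pv_equiv track=rewrite | github.com/JonnoB/enhance_ocod | prep_helper_functions.py | remove_overlapping_spans_tuples
-- ===== SOURCE A (Python) =====
-- def is_overlap_function_tuples(a,b):
--     ##This version uses tuples and is adapted to create a spacy format
--
--     #identifies any overlapping tags.
--     #takes two dictionaries and outputs a logical value identifying if the tags overlap
--      start_overlap = (b[0] >= a[0]) & (b[0] <= a[1])
--      end_overlap = (b[1] >= a[0]) & (b[1] <= a[1])
--      return (start_overlap | end_overlap)
--
-- def remove_overlapping_spans_tuples(list_of_labels_dict):
--     ##This version uses tuples and is adapted to create a spacy format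
--
--     #This function iterates through the list pairwise checking to see if there are overlaps
--     #this function builds on the previous version which checked for overlaps in one go
--     #but didn't consider that a single entity might overlap several subsequent entities
--     #example A (start = 0, end = 20), B (start = 3, end = 10), C (start = 12, end = 20)
--     #A overlaps B and C even though B and C do not overlap, as a result only A should remain
--
--     i = 0
--     j = i+1
--     while j < len(list_of_labels_dict):
--
--
--         #check if there is overlap
--         pair_overlaps = is_overlap_function_tuples(list_of_labels_dict[i],list_of_labels_dict[j])
--         if pair_overlaps:
--             #get index of smallest span
--             span_a = list_of_labels_dict[i][1] - list_of_labels_dict[i][0]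
--             span_b = list_of_labels_dict[j][1] - list_of_labels_dict[j][0]
--
--             if span_a > span_b:
--                 list_of_labels_dict.pop(j)
--             else:
--                 list_of_labels_dict.pop(i)
--         else:
--             #i and j are only updated here as if either is removed the indexing changed such that the original i and j values now represent differnt elements
--             #only when there is no overlap should the indexes advance
--             i = i +1
--             j = i +1
--
--     return list_of_labels_dict
-- ===== SOURCE B (Python) =====
-- def _spans_overlap(a, b):
--     # b's start or b's end falls inside a's range
--     return (a[0] <= b[0] <= a[1]) or (a[0] <= b[1] <= a[1])
--
-- def remove_overlapping_spans_tuples(list_of_labels_dict):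
--     # Single left-to-right pass: keep a 'current' span, append to a fresh
--     # result list instead of popping from the input (input is NOT mutated).
--     if not list_of_labels_dict:
--         return []
--     result = []
--     cur = list_of_labels_dict[0]
--     for x in list_of_labels_dict[1:]:
--         if _spans_overlap(cur, x):
--             if cur[1] - cur[0] > x[1] - x[0]:
--                 pass  # keep the larger current span
--             else:
--                 cur = x  # ties keep the later span, as in the original
--         else:
--             result.append(cur)
--             cur = x
--     result.append(cur)
--     return result
-- ===== Notes on version B (the rewrite author's own statement) =====
-- stated objective: alternative
-- what changed: Replaced the index-based while loop that repeatedly pops from the input list with a single left-to-right pass that keeps a 'current' span and appends winners to a fresh result list (input no longer mutated).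
import Mathlib
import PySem

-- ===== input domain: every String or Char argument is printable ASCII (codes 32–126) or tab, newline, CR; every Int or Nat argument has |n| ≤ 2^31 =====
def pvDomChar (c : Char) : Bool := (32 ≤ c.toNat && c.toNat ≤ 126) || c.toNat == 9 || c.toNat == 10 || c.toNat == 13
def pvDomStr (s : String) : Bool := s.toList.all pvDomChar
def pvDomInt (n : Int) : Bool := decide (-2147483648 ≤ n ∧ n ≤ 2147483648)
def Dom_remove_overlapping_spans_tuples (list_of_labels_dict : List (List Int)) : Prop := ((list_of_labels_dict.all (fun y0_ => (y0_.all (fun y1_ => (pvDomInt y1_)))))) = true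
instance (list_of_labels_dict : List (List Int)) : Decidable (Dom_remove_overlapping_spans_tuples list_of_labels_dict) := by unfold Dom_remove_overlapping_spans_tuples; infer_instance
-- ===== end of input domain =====

-- B replaces A's pop-based pairwise while loop by one left-to-right pass over a fresh
-- result list; equivalence is about the RETURN value only — the Python A mutates its
-- argument in place, B does not.

-- ===== PORT A =====
-- is_overlap_function_tuples(a, b)
def pvOverlapA (a b : List Int) : Bool :=
  let a0 := PySem.List.pyGetD a 0 0
  let a1 := PySem.List.pyGetD a 1 0
  let b0 := PySem.List.pyGetD b 0 0
  let b1 := PySem.List.pyGetD b 1 0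
  ((b0 ≥ a0 && b0 ≤ a1) || (b1 ≥ a0 && b1 ≤ a1))

-- the while loop, state = (current list, i); j is always i+1
def pvLoopA (l : List (List Int)) (i : Nat) : List (List Int) :=
  if h : i + 1 < l.length then
    let ei := PySem.List.pyGetD l (Int.ofNat i) []
    let ej := PySem.List.pyGetD l (Int.ofNat (i+1)) []
    if pvOverlapA ei ej then
      let span_a := PySem.List.pyGetD ei 1 0 - PySem.List.pyGetD ei 0 0
      let span_b := PySem.List.pyGetD ej 1 0 - PySem.List.pyGetD ej 0 0
      if span_a > span_b then
        pvLoopA (l.eraseIdx (i+1)) i   -- list.pop(j) at a valid index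
      else
        pvLoopA (l.eraseIdx i) i       -- list.pop(i) at a valid index
    else
      pvLoopA l (i+1)
  else l
termination_by l.length - i
decreasing_by
  · rw [List.length_eraseIdx_of_lt (by omega)]; omega
  · rw [List.length_eraseIdx_of_lt (by omega)]; omega
  · omega

def remove_overlapping_spans_tuples (list_of_labels_dict : List (List Int)) : List (List Int) :=
  pvLoopA list_of_labels_dict 0

-- ===== PORT B =====
def pvOverlapB (a b : List Int) : Bool :=
  let a0 := PySem.List.pyGetD a 0 0
  let a1 := PySem.List.pyGetD a 1 0
  let b0 := PySem.List.pyGetD b 0 0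
  let b1 := PySem.List.pyGetD b 1 0
  ((a0 ≤ b0 && b0 ≤ a1) || (a0 ≤ b1 && b1 ≤ a1))

def pvSpan (x : List Int) : Int := PySem.List.pyGetD x 1 0 - PySem.List.pyGetD x 0 0

-- the for-loop of Source B: result accumulator + current span
def pvLoopB (cur : List Int) (rest : List (List Int)) (result : List (List Int)) : List (List Int) :=
  match rest with
  | [] => result ++ [cur]
  | x :: xs =>
    if pvOverlapB cur x then
      if pvSpan cur > pvSpan x then pvLoopB cur xs result
      else pvLoopB x xs result
    else pvLoopB x xs (result ++ [cur])

def remove_overlapping_spans_tuples_alt (list_of_labels_dict : List (List Int)) : List (List Int) :=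
  match list_of_labels_dict with
  | [] => []
  | c :: rest => pvLoopB c rest []

-- ===== PRECONDITION & SPEC =====
-- Pre_ excludes exactly the inputs where Python A raises IndexError: lists with ≥ 2
-- elements of which some inner list has fewer than 2 entries.
def Pre_remove_overlapping_spans_tuples (list_of_labels_dict : List (List Int)) : Prop :=
  2 ≤ list_of_labels_dict.length → ∀ x ∈ list_of_labels_dict, 2 ≤ x.length
instance (list_of_labels_dict : List (List Int)) : Decidable (Pre_remove_overlapping_spans_tuples list_of_labels_dict) := by unfold Pre_remove_overlapping_spans_tuples; infer_instance
def pvWitness_remove_overlapping_spans_tuples : List (List Int) := [[0, 5], [1, 2], [7, 9]]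

def Spec_remove_overlapping_spans_tuples (list_of_labels_dict : List (List Int)) (out : List (List Int)) : Prop := out = remove_overlapping_spans_tuples_alt list_of_labels_dict
instance (list_of_labels_dict : List (List Int)) (out : List (List Int)) : Decidable (Spec_remove_overlapping_spans_tuples list_of_labels_dict out) := by unfold Spec_remove_overlapping_spans_tuples; infer_instance

-- ===== CLAIM (what is proved, stated in full; the proofs are below) =====
def Claim_equal_remove_overlapping_spans_tuples : Prop := ∀ (list_of_labels_dict : List (List Int)), Dom_remove_overlapping_spans_tuples list_of_labels_dict → Pre_remove_overlapping_spans_tuples list_of_labels_dict → Spec_remove_overlapping_spans_tuples list_of_labels_dict (remove_overlapping_spans_tuples list_of_labels_dict)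

-- ===== LEMMAS AND PROOFS =====

theorem pvOverlap_eq (a b : List Int) : pvOverlapA a b = pvOverlapB a b := rfl

theorem pvLoopB_acc (cur : List Int) (rest pre acc : List (List Int)) :
    pvLoopB cur rest (pre ++ acc) = pre ++ pvLoopB cur rest acc := by
  induction rest generalizing cur acc with
  | nil => simp [pvLoopB]
  | cons x xs ih =>
    simp only [pvLoopB]
    split_ifs with h1 h2
    · exact ih cur acc
    · exact ih x acc
    · rw [List.append_assoc]; exact ih x (acc ++ [cur])

theorem pvGetD_at (pre : List (List Int)) (cur : List Int) (rest : List (List Int)) :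
    PySem.List.pyGetD (pre ++ cur :: rest) (Int.ofNat pre.length) [] = cur := by
  rw [show Int.ofNat pre.length = ((pre.length : Nat) : Int) from rfl, PySem.List.pyGetD_natCast]
  simp [List.getD]

theorem pvLoopA_eq (rest : List (List Int)) : ∀ (cur : List Int) (pre : List (List Int)),
    pvLoopA (pre ++ cur :: rest) pre.length = pre ++ pvLoopB cur rest [] := by
  induction rest with
  | nil =>
    intro cur pre
    rw [pvLoopA]
    simp [pvLoopB]
  | cons x xs ih =>
    intro cur pre
    rw [pvLoopA]
    have hlen : pre.length + 1 < (pre ++ cur :: x :: xs).length := by simp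
    have hi : PySem.List.pyGetD (pre ++ cur :: x :: xs) (Int.ofNat pre.length) [] = cur :=
      pvGetD_at pre cur (x :: xs)
    have hj : PySem.List.pyGetD (pre ++ cur :: x :: xs) (Int.ofNat (pre.length + 1)) [] = x := by
      have h := pvGetD_at (pre ++ [cur]) x xs
      simpa [List.append_assoc] using h
    have herasej : (pre ++ cur :: x :: xs).eraseIdx (pre.length + 1) = pre ++ cur :: xs := by
      have h := List.eraseIdx_append_of_length_le
        (l := pre ++ [cur]) (k := pre.length + 1) (by simp) (x :: xs)
      simpa [List.append_assoc] using h
    have herasei : (pre ++ cur :: x :: xs).eraseIdx pre.length = pre ++ x :: xs := by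
      have h := List.eraseIdx_append_of_length_le
        (l := pre) (k := pre.length) (by simp) (cur :: x :: xs)
      simpa using h
    simp only [dif_pos hlen, hi, hj, pvOverlap_eq]
    conv_rhs => rw [pvLoopB]
    simp only [pvSpan, List.nil_append]
    split_ifs with h1 h2
    · rw [herasej, ih cur pre]
    · rw [herasei, ih x pre]
    · have h' : pvLoopA (pre ++ cur :: x :: xs) (pre ++ [cur]).length
          = pre ++ [cur] ++ pvLoopB x xs [] := by
        simpa using ih x (pre ++ [cur])
      rw [show pre.length + 1 = (pre ++ [cur]).length by simp, h', List.append_assoc]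
      congr 1
      simpa using (pvLoopB_acc x xs [cur] []).symm

-- ===== VERDICT (by name: the statement is the Claim_ definition above) =====
theorem remove_overlapping_spans_tuples_spec : Claim_equal_remove_overlapping_spans_tuples := by
  intro l _ _
  unfold Spec_remove_overlapping_spans_tuples remove_overlapping_spans_tuples remove_overlapping_spans_tuples_alt
  cases l with
  | nil => rw [pvLoopA]; simp
  | cons c rest => simpa using pvLoopA_eq rest c []
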